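-- pv_equiv track=rewrite | github.com/ting1011/2026-python | weeks/week-07/solutions/0408/QUESTION-10062-easy.py | restore_cows_easy
-- ===== SOURCE A (Python) =====
-- def restore_cows_easy(order):
--     """
--     order: 長度 N-1，order[i] 表示第 i+1 頭牛前面有多少頭編號比它小的牛
--     回傳: 長度 N，為正確排列的乳牛編號（1~N）
--     """
--     N = len(order) + 1
--     res = []  # 最終排列
--     for cow in range(N, 0, -1):
--         # 每次將編號 cow 插入到正確位置
--         idx = order[cow-2] if cow > 1 else 0
--         res.insert(idx, cow)
--     res.reverse()  # 反轉得到正確順序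
--     return res
-- ===== SOURCE B (Python) =====
-- def _insert_index(i, n):
--     """The slot a list of length n receives an element at under list.insert(i, x)."""
--     if i < 0:
--         i += n
--     return min(max(i, 0), n)
--
--
-- def _build(lo, hi):
--     """Segment tree over slots [lo, hi): node = [free_count, slot, left, right]."""
--     if hi - lo == 1:
--         return [1, lo, None, None]
--     mid = (lo + hi) // 2
--     left = _build(lo, mid)
--     right = _build(mid, hi)
--     return [left[0] + right[0], None, left, right]
--
--
-- def _take(node, e):
--     """Claim and return the e-th (0-based, left to right) still-free slot."""
--     node[0] -= 1
--     if node[2] is None: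
--         return node[1]
--     if e < node[2][0]:
--         return _take(node[2], e)
--     return _take(node[3], e - node[2][0])
--
--
-- def restore_cows_easy(order):
--     """
--     order: 長度 N-1，order[i] 表示第 i+1 頭牛前面有多少頭編號比它小的牛
--     回傳: 長度 N，為正確排列的乳牛編號（1~N）
--
--     The sequence of N insertions is simulated offline: replayed in reverse
--     order, the element of each insert lands in the e-th currently unclaimed
--     slot of the final list, e being the slot that insert targeted; a segment
--     tree locates each such slot.
--     """
--     N = len(order) + 1
--     res = [0] * N
--     tree = _build(0, N)
--     for cow in range(1, N + 1):
--         i = order[cow - 2] if cow > 1 else 0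
--         e = _insert_index(i, N - cow)   # the list had N - cow elements then
--         res[_take(tree, e)] = cow
--     return res[::-1]
-- ===== Notes on version B (the rewrite author's own statement) =====
-- stated objective: alternative
-- what changed: B simulates the sequence of N list.insert calls offline: replayed in reverse, each insert claims the e-th still-free slot of the final array, located with a segment tree over the slots, instead of A's repeated list.insert on a growing list followed by a reverse.
import Mathlib
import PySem

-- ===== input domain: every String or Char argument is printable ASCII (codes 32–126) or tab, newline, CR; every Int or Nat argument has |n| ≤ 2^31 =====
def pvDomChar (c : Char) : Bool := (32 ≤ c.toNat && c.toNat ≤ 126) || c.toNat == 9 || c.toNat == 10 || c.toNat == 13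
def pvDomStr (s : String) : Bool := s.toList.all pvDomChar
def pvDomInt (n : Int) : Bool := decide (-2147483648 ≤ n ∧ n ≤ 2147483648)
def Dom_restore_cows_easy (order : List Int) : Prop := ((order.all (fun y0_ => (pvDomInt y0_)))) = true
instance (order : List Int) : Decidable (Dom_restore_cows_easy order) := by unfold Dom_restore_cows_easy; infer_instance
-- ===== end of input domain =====

-- B simulates the N insertions offline with a segment tree over the free slots of the final
-- list (each insert, replayed in reverse, claims the e-th still-free slot), instead of A's
-- repeated list.insert into a growing list.

-- ===== PORT A =====
def restore_cows_easy (order : List Int) : List Int :=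
  let N : Int := (order.length : Int) + 1
  let res : List Int :=
    (PySem.List.pyRange N 0 (-1)).foldl
      (fun res cow =>
        -- order[cow-2] is always in range here (2 ≤ cow ≤ N), so Python's order[cow-2]
        -- never raises and pyGetD with an unused default is exact
        let idx : Int := if cow > 1 then PySem.List.pyGetD order (cow - 2) 0 else 0
        PySem.List.insert res idx cow)
      []
  res.reverse

-- ===== PORT B =====
-- the slot a list of length n receives an element at under list.insert(i, x)
def insertIndex (i n : Int) : Int :=
  let i := if i < 0 then i + n else i
  min (max i 0) n

-- segment tree over a range of slots: leaf (free count, slot) / node (free count, children)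
inductive PVTree where
  | leaf : Int → Int → PVTree
  | node : Int → PVTree → PVTree → PVTree

def tCount (t : PVTree) : Int :=
  match t with
  | .leaf c _ => c
  | .node c _ _ => c

-- Python's recursive _build; the fuel only makes the recursion structural (the port is
-- called with fuel ≥ hi - lo, which the recursion never exhausts)
def tBuild (fuel : Nat) (lo hi : Int) : PVTree :=
  match fuel with
  | 0 => .leaf 1 lo
  | fuel + 1 =>
    if hi - lo == 1 then .leaf 1 lo
    else
      let mid := PySem.Int.floordiv (lo + hi) 2
      let l := tBuild fuel lo mid
      let r := tBuild fuel mid hi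
      .node (tCount l + tCount r) l r

-- Python's _take: claim the e-th still-free slot (the Python mutates the node counts in
-- place and returns the slot; the port returns the slot together with the updated tree)
def tTake (t : PVTree) (e : Int) : Int × PVTree :=
  match t with
  | .leaf c lo => (lo, .leaf (c - 1) lo)
  | .node c l r =>
    if e < tCount l then
      let p := tTake l e
      (p.1, .node (c - 1) p.2 r)
    else
      let p := tTake r (e - tCount l)
      (p.1, .node (c - 1) l p.2)

def restore_cows_easy_alt (order : List Int) : List Int :=
  let N : Int := (order.length : Int) + 1
  let st :=
    (PySem.List.pyRange 1 (N + 1) 1).foldl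
      (fun (st : PVTree × List Int) cow =>
        let i : Int := if cow > 1 then PySem.List.pyGetD order (cow - 2) 0 else 0
        let e : Int := insertIndex i (N - cow)
        let p := tTake st.1 e
        -- the claimed slot lies in [0, N), so Python's res[slot] is exact
        (p.2, st.2.set p.1.toNat cow))
      (tBuild N.toNat 0 N, List.replicate N.toNat 0)
  (st.2).reverse

-- ===== PRECONDITION & SPEC =====
def Spec_restore_cows_easy (order : List Int) (out : List Int) : Prop := out = restore_cows_easy_alt order
instance (order : List Int) (out : List Int) : Decidable (Spec_restore_cows_easy order out) := by unfold Spec_restore_cows_easy; infer_instance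

-- ===== CLAIM (what is proved, stated in full; the proofs are below) =====
def Claim_equal_restore_cows_easy : Prop := ∀ (order : List Int), Dom_restore_cows_easy order → Spec_restore_cows_easy order (restore_cows_easy order)

-- ===== LEMMAS AND PROOFS =====

-- the raw index A reads for cow c, and Python's clamp of it against a list of length `len`
def rawOf (order : List Int) (c : Int) : Int :=
  if c > 1 then PySem.List.pyGetD order (c - 2) 0 else 0
def clampIdx (len raw : Int) : Int :=
  if raw < 0 then (if len + raw < 0 then 0 else len + raw)
  else (if raw < len then raw else len)

lemma insertIndex_eq_clamp (i n : Int) (hn : 0 ≤ n) : insertIndex i n = clampIdx n i := by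
  simp only [insertIndex, clampIdx, min_def, max_def]
  split_ifs <;> omega

-- A's loop, as structural recursion: aSim k = A's res after inserting cows N, N-1, …, N-k+1
def aSim (order : List Int) (N : Int) : Nat → List Int
  | 0 => []
  | k+1 => PySem.List.insert (aSim order N k) (rawOf order (N - k)) (N - k)

-- proof-side model of B's loop: the free slots as a plain list, popped at the clamped index
def oSim (order : List Int) (N : Int) : Nat → List Int → List Int → (List Int × List Int)
  | 0, free, ans => (free, ans)
  | k+1, free, ans =>
    match PySem.List.pop? free (clampIdx (N - (N - (k:Int))) (rawOf order (N - k))) with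
    | some (slot, free') => oSim order N k free' (ans.set slot.toNat (N - k))
    | none => oSim order N k free ans

-- B's loop, as structural recursion over the segment tree
def tSim (order : List Int) (N : Int) : Nat → PVTree → List Int → (PVTree × List Int)
  | 0, t, res => (t, res)
  | k+1, t, res =>
    let p := tTake t (insertIndex (rawOf order (N - k)) (N - (N - (k:Int))))
    tSim order N k p.2 (res.set p.1.toNat (N - k))

-- the list of still-free slots a (well-formed) tree stands for, left to right
def tToList (t : PVTree) : List Int :=
  match t with
  | .leaf c lo => if c = 1 then [lo] else []
  | .node _ l r => tToList l ++ tToList r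

def tWf (t : PVTree) : Prop :=
  match t with
  | .leaf c _ => c = 0 ∨ c = 1
  | .node c l r => c = tCount l + tCount r ∧ tWf l ∧ tWf r

lemma tCount_eq_length (t : PVTree) (h : tWf t) : tCount t = ((tToList t).length : Int) := by
  induction t with
  | leaf c lo => rcases h with h | h <;> simp [tToList, tCount, h]
  | node c l r ihl ihr =>
      obtain ⟨hc, hl, hr⟩ := h
      show c = _
      rw [hc, ihl hl, ihr hr]
      simp only [tToList, List.length_append]
      push_cast
      ring

-- claiming the e-th free slot returns the e-th element of the free list and erases it
lemma tTake_spec (t : PVTree) (e : Int) (h : tWf t) (h0 : 0 ≤ e) (hlt : e < tCount t) :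
    (tTake t e).1 = (tToList t).getD e.toNat 0
    ∧ tWf (tTake t e).2
    ∧ tToList (tTake t e).2 = (tToList t).eraseIdx e.toNat := by
  induction t generalizing e with
  | leaf c lo =>
      have hc : c = 1 := by
        rcases h with h | h
        · simp [tCount, h] at hlt; omega
        · exact h
      subst hc
      have he : e = 0 := by simp [tCount] at hlt; omega
      subst he
      refine ⟨rfl, Or.inl (by norm_num), ?_⟩
      simp [tTake, tToList]
  | node c l r ihl ihr =>
      obtain ⟨hc, hl, hr⟩ := h
      have hcl := tCount_eq_length l hl
      have hcr := tCount_eq_length r hr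
      by_cases hb : e < tCount l
      · obtain ⟨s1, s2, s3⟩ := ihl e hl h0 hb
        have hlen : e.toNat < (tToList l).length := by omega
        refine ⟨?_, ?_, ?_⟩
        · simp only [tTake, if_pos hb, tToList]
          rw [s1, List.getD_append _ _ _ _ hlen]
        · simp only [tTake, if_pos hb]
          have h5 := tCount_eq_length _ s2
          rw [s3, List.length_eraseIdx_of_lt hlen] at h5
          refine ⟨?_, s2, hr⟩
          show c - 1 = tCount (tTake l e).2 + tCount r
          omega
        · simp only [tTake, if_pos hb, tToList]
          rw [s3, List.eraseIdx_append_of_lt_length hlen]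
      · have h0' : 0 ≤ e - tCount l := by omega
        have hlt' : e - tCount l < tCount r := by
          have hcc : tCount (.node c l r) = c := rfl
          rw [hcc] at hlt
          omega
        obtain ⟨s1, s2, s3⟩ := ihr (e - tCount l) hr h0' hlt'
        have hlen : (tToList l).length ≤ e.toNat := by omega
        have hsub : (e - tCount l).toNat = e.toNat - (tToList l).length := by omega
        refine ⟨?_, ?_, ?_⟩
        · simp only [tTake, if_neg hb, tToList]
          rw [s1, List.getD_append_right _ _ _ _ hlen, hsub]
        · simp only [tTake, if_neg hb]
          have h5 := tCount_eq_length _ s2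
          rw [s3] at h5
          rw [List.length_eraseIdx_of_lt (by omega)] at h5
          refine ⟨?_, hl, s2⟩
          show c - 1 = tCount l + tCount (tTake r (e - tCount l)).2
          omega
        · simp only [tTake, if_neg hb, tToList]
          rw [s3, List.eraseIdx_append_of_length_le hlen, hsub]
      -- count of the new subtree: the invariant `c - 1 = count l' + count r'`
      -- is discharged inline above via tCount_eq_length

-- the built tree is well-formed and stands for the full range of slots
lemma tBuild_spec (fuel : Nat) : ∀ lo hi : Int, 1 ≤ hi - lo → hi - lo ≤ (fuel : Int) →
    tWf (tBuild fuel lo hi) ∧ tToList (tBuild fuel lo hi) = PySem.List.pyRange lo hi 1 := by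
  induction fuel with
  | zero => intro lo hi h1 h2; omega
  | succ fuel ih =>
      intro lo hi h1 h2
      by_cases hbase : hi - lo = 1
      · have : (hi - lo == 1) = true := by simp [hbase]
        simp only [tBuild, this, if_true]
        refine ⟨Or.inr rfl, ?_⟩
        rw [PySem.List.pyRange_one_cons (by omega), PySem.List.pyRange_one_eq_nil (by omega)]
        simp [tToList]
      · have hge2 : 2 ≤ hi - lo := by omega
        have : (hi - lo == 1) = false := by simp; omega
        simp only [tBuild, this, Bool.false_eq_true, if_false]
        set mid := PySem.Int.floordiv (lo + hi) 2 with hmid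
        have hmid1 : lo + 1 ≤ mid := by
          rw [hmid, PySem.Int.le_floordiv_iff_mul_le (by omega)]
          omega
        have hmid2 : mid ≤ hi - 1 := by
          have := (PySem.Int.floordiv_lt_iff_lt_mul (a := lo + hi) (b := 2) (q := hi) (by omega)).mpr (by omega)
          omega
        obtain ⟨wl, ll⟩ := ih lo mid (by omega) (by omega)
        obtain ⟨wr, lr⟩ := ih mid hi (by omega) (by omega)
        refine ⟨⟨rfl, wl, wr⟩, ?_⟩
        simp only [tToList, ll, lr]
        exact (PySem.List.pyRange_one_append lo mid hi (by omega) (by omega)).symm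

-- B's tree loop computes the same answer array as the free-list model
lemma tSim_eq_oSim (order : List Int) (N : Int) :
    ∀ (k : Nat) (t : PVTree) (ans : List Int), tWf t → (tToList t).length = k →
      (tSim order N k t ans).2 = (oSim order N k (tToList t) ans).2 := by
  intro k
  induction k with
  | zero => intro t ans _ _; rfl
  | succ k ih =>
      intro t ans hwf hlen
      set raw := rawOf order (N - (k:Int)) with hraw
      set e := clampIdx (N - (N - (k:Int))) raw with he
      have hee : insertIndex raw (N - (N - (k:Int))) = e := by
        rw [insertIndex_eq_clamp _ _ (by omega)]
      have hcnt := tCount_eq_length t hwf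
      have heb : 0 ≤ e ∧ e ≤ (k : Int) := by
        rw [he]; simp only [clampIdx]; split_ifs <;> omega
      obtain ⟨s1, s2, s3⟩ := tTake_spec t e hwf heb.1 (by omega)
      have hpop : PySem.List.pop? (tToList t) e
          = some ((tToList t)[e.toNat]'(by omega), (tToList t).eraseIdx e.toNat) := by
        have h := PySem.List.pop?_natCast (tToList t) e.toNat (by omega)
        rw [show ((e.toNat : Nat) : Int) = e from by omega] at h
        exact h
      have hgd : (tToList t).getD e.toNat 0 = (tToList t)[e.toNat]'(by omega) :=
        List.getD_eq_getElem _ 0 (by omega)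
      have hstepT : tSim order N (k+1) t ans
          = tSim order N k (tTake t e).2 (ans.set ((tTake t e).1).toNat (N - k)) := by
        simp only [tSim, ← hraw, hee]
      have hstepO : oSim order N (k+1) (tToList t) ans
          = oSim order N k ((tToList t).eraseIdx e.toNat)
              (ans.set ((tToList t)[e.toNat]'(by omega)).toNat (N - k)) := by
        simp only [oSim, ← hraw, ← he, hpop]
      rw [hstepT, hstepO, s1, hgd, ← s3]
      exact ih (tTake t e).2 _ s2
        (by rw [s3, List.length_eraseIdx_of_lt (by omega)]; omega)

-- Python list.insert at an arbitrary int index = take/drop at the clamped position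
lemma pyInsert_take_drop (xs : List Int) (i v : Int) :
    PySem.List.insert xs i v =
      xs.take ((if i < 0 then max (i + xs.length) 0 else min i (xs.length : Int)).toNat)
        ++ v :: xs.drop ((if i < 0 then max (i + xs.length) 0 else min i (xs.length : Int)).toNat) := by
  simp [PySem.List.insert, PySem.List.sliceIndices]

lemma aSim_length (order : List Int) (N : Int) (k : Nat) : (aSim order N k).length = k := by
  induction k with
  | zero => rfl
  | succ k ih => simp only [aSim, PySem.List.length_insert, ih]

lemma getD_insertAt (l : List Int) (e j : Nat) (v : Int) (he : e ≤ l.length) :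
    (l.take e ++ v :: l.drop e).getD j 0 =
      if j < e then l.getD j 0 else if j = e then v else l.getD (j-1) 0 := by
  simp only [List.getD_eq_getElem?_getD]
  rcases lt_trichotomy j e with h | h | h
  · rw [List.getElem?_append_left (by rw [List.length_take]; omega)]
    rw [List.getElem?_take_of_lt h]
    simp [h]
  · subst h
    rw [List.getElem?_append_right (by rw [List.length_take]; omega)]
    simp [List.length_take, Nat.min_eq_left he]
  · rw [List.getElem?_append_right (by rw [List.length_take]; omega)]
    have h1 : j - (l.take e).length = (j - e - 1) + 1 := by rw [List.length_take]; omega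
    rw [h1]
    simp only [List.getElem?_cons_succ, List.getElem?_drop]
    have : e + (j - e - 1) = j - 1 := by omega
    rw [this]
    have : ¬ j < e := by omega
    simp [this, Nat.ne_of_gt h]

lemma getD_eraseIdx (l : List Int) (p j : Nat) (hp : p < l.length) :
    (l.eraseIdx p).getD j 0 = if j < p then l.getD j 0 else l.getD (j+1) 0 := by
  rw [List.eraseIdx_eq_take_drop_succ]
  simp only [List.getD_eq_getElem?_getD]
  rcases lt_or_ge j p with h | h
  · rw [List.getElem?_append_left (by rw [List.length_take]; omega)]
    rw [List.getElem?_take_of_lt h]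
    simp [h]
  · rw [List.getElem?_append_right (by rw [List.length_take]; omega)]
    rw [List.getElem?_drop]
    have h2 : p + 1 + (j - (l.take p).length) = j + 1 := by rw [List.length_take]; omega
    rw [h2]
    simp [Nat.not_lt.mpr h]

-- core invariant: after oSim, slot free[j] of ans holds aSim[j]; other slots untouched
lemma oSim_core (order : List Int) (N : Int) :
    ∀ (k : Nat) (free ans : List Int),
      free.length = k → free.Nodup → (∀ x ∈ free, 0 ≤ x ∧ x < N) →
      (∀ x ∈ free, x.toNat < ans.length) →
      (∀ j : Nat, j < k →
        ((oSim order N k free ans).2).getD ((free.getD j 0).toNat) 0 = (aSim order N k).getD j 0)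
      ∧ (∀ i : Nat, (∀ x ∈ free, x.toNat ≠ i) →
        ((oSim order N k free ans).2).getD i 0 = ans.getD i 0)
      ∧ ((oSim order N k free ans).2).length = ans.length := by
  intro k
  induction k with
  | zero =>
      intro free ans h1 h2 h3 h4
      refine ⟨fun j hj => absurd hj (by omega), fun i _ => rfl, rfl⟩
  | succ k ih =>
      intro free ans h1 h2 h3 h4
      set raw := rawOf order (N - (k:Int)) with hraw
      have hcb : 0 ≤ clampIdx (N - (N - (k:Int))) raw ∧ clampIdx (N - (N - (k:Int))) raw ≤ (k:Int) := by
        simp only [clampIdx]; split_ifs <;> omega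
      set e : Nat := (clampIdx (N - (N - (k:Int))) raw).toNat with he
      have hcast : clampIdx (N - (N - (k:Int))) raw = ((e : Nat) : Int) := by omega
      have hek : e ≤ k := by omega
      have helt : e < free.length := by omega
      have hpop : PySem.List.pop? free (clampIdx (N - (N - (k:Int))) raw)
          = some (free[e], free.eraseIdx e) := by
        rw [hcast]; exact PySem.List.pop?_natCast free e helt
      have hred : oSim order N (k+1) free ans
          = oSim order N k (free.eraseIdx e) (ans.set (free[e]).toNat (N - k)) := by
        simp only [oSim, ← hraw, hpop]
      set F' := free.eraseIdx e with hF'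
      set A' := ans.set (free[e]).toNat (N - k) with hA'
      have hsub : ∀ x ∈ F', x ∈ free := fun x hx => List.mem_of_mem_eraseIdx hx
      have hF'len : F'.length = k := by rw [hF', List.length_eraseIdx_of_lt helt]; omega
      have hF'nd : F'.Nodup := List.Nodup.eraseIdx e h2
      have hF'3 : ∀ x ∈ F', 0 ≤ x ∧ x < N := fun x hx => h3 x (hsub x hx)
      have hA'len : A'.length = ans.length := by rw [hA', List.length_set]
      have hF'4 : ∀ x ∈ F', x.toNat < A'.length := by
        intro x hx; rw [hA'len]; exact h4 x (hsub x hx)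
      have hmem_e : free[e] ∈ free := List.getElem_mem helt
      have hnotmem : free[e] ∉ F' := by
        intro hmem
        obtain ⟨j, hj, hval⟩ := List.getElem_of_mem hmem
        have hj' : j < free.length - 1 := by rw [hF', List.length_eraseIdx_of_lt helt] at hj; exact hj
        have hx : F'.getD j 0 = free[e] := by rw [List.getD_eq_getElem _ 0 hj, hval]
        rw [hF', getD_eraseIdx free e j helt] at hx
        by_cases hje : j < e
        · rw [if_pos hje, List.getD_eq_getElem _ 0 (by omega)] at hx
          have := (List.Nodup.getElem_inj_iff h2).mp hx
          omega
        · rw [if_neg hje, List.getD_eq_getElem _ 0 (by omega)] at hx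
          have := (List.Nodup.getElem_inj_iff h2).mp hx
          omega
      have hinj : ∀ x ∈ free, x.toNat = (free[e]).toNat → x = free[e] := by
        intro x hx hxe
        have b1 := h3 x hx
        have b2 := h3 free[e] hmem_e
        omega
      obtain ⟨IH1, IH2, IH3⟩ := ih F' A' hF'len hF'nd hF'3 hF'4
      have hnoclash : ∀ x ∈ F', x.toNat ≠ (free[e]).toNat := by
        intro x hx hxe
        exact hnotmem (hinj x (hsub x hx) hxe ▸ hx)
      have hAe : (oSim order N (k+1) free ans).2.getD ((free[e]).toNat) 0 = N - k := by
        rw [hred, IH2 _ hnoclash, hA']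
        rw [List.getD_eq_getElem?_getD, List.getElem?_set_self (h4 free[e] hmem_e)]
        rfl
      -- unfold aSim (k+1) as take/drop around position e
      have hlenk := aSim_length order N k
      have hsimS : aSim order N (k+1)
          = (aSim order N k).take e ++ (N - (k:Int)) :: (aSim order N k).drop e := by
        rw [show aSim order N (k+1) = PySem.List.insert (aSim order N k) raw (N - k) from rfl]
        rw [pyInsert_take_drop]
        have hE : (if raw < 0 then max (raw + ((aSim order N k).length:Int)) 0
            else min raw ((aSim order N k).length:Int)).toNat = e := by
          rw [hlenk]
          simp only [clampIdx] at he
          split_ifs at he ⊢ <;> omega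
        rw [hE]
      refine ⟨?_, ?_, ?_⟩
      · intro j hj
        rw [hsimS, getD_insertAt _ e j _ (by omega)]
        rcases lt_trichotomy j e with hje | hje | hje
        · rw [if_pos hje]
          have hgd : free.getD j 0 = F'.getD j 0 := by
            rw [hF', getD_eraseIdx free e j helt, if_pos hje]
          rw [hgd, hred]
          exact IH1 j (by omega)
        · subst hje
          rw [if_neg (by omega), if_pos rfl]
          rw [List.getD_eq_getElem _ 0 helt]
          exact hAe
        · rw [if_neg (by omega), if_neg (by omega)]
          have hj1 : j - 1 < k := by omega
          have hgd : free.getD j 0 = F'.getD (j-1) 0 := by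
            rw [hF', getD_eraseIdx free e (j-1) helt, if_neg (by omega),
              show j - 1 + 1 = j by omega]
          rw [hgd, hred]
          exact IH1 (j-1) hj1
      · intro i hi
        rw [hred, IH2 i (fun x hx => hi x (hsub x hx)), hA']
        rw [List.getD_eq_getElem?_getD, List.getD_eq_getElem?_getD,
          List.getElem?_set_ne (hi free[e] hmem_e)]
      · rw [hred, IH3, hA'len]

lemma aFold (order : List Int) (N : Int) (k : Nat) :
    (PySem.List.pyRange N (N - k) (-1)).foldl
      (fun res cow =>
        let idx : Int := if cow > 1 then PySem.List.pyGetD order (cow - 2) 0 else 0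
        PySem.List.insert res idx cow) []
    = aSim order N k := by
  induction k with
  | zero => rw [PySem.List.pyRange_neg_one_eq_nil (by omega)]; rfl
  | succ k ih =>
      have e1 : (N - (↑(k+1):Int)) = N - ↑k - 1 := by push_cast; ring
      rw [e1]
      have hs : PySem.List.pyRange N (N - ↑k - 1) (-1)
          = PySem.List.pyRange N (N - ↑k) (-1) ++ [N - ↑k] := by
        rw [PySem.List.pyRange_neg_one_eq_reverse, PySem.List.pyRange_neg_one_eq_reverse]
        rw [show N - (↑k:Int) - 1 + 1 = N - ↑k by ring]
        rw [PySem.List.pyRange_one_cons (by omega)]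
        simp
      rw [hs, List.foldl_append, ih]
      simp only [List.foldl_cons, List.foldl_nil, aSim, rawOf]

lemma tFold (order : List Int) (N : Int) (k : Nat) (t : PVTree) (res : List Int) :
    (PySem.List.pyRange (N + 1 - k) (N + 1) 1).foldl
      (fun (st : PVTree × List Int) cow =>
        let i : Int := if cow > 1 then PySem.List.pyGetD order (cow - 2) 0 else 0
        let e : Int := insertIndex i (N - cow)
        let p := tTake st.1 e
        (p.2, st.2.set p.1.toNat cow)) (t, res)
    = tSim order N k t res := by
  induction k generalizing t res with
  | zero => rw [PySem.List.pyRange_one_eq_nil (by omega)]; rfl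
  | succ k ih =>
      have e1 : N + 1 - (↑(k+1):Int) = N - ↑k := by push_cast; ring
      rw [e1, PySem.List.pyRange_one_cons (by omega)]
      rw [List.foldl_cons, show N - (↑k:Int) + 1 = N + 1 - ↑k by ring]
      show _ = tSim order N (k+1) t res
      simp only [tSim, rawOf]
      exact ih _ _

-- ===== VERDICT (by name: the statement is the Claim_ definition above) =====
theorem restore_cows_easy_spec : Claim_equal_restore_cows_easy := by
  intro order _
  unfold Spec_restore_cows_easy restore_cows_easy restore_cows_easy_alt
  set n := order.length with hn
  set N : Int := (n:Int) + 1 with hN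
  -- rewrite both loops as the structural recursions
  have hA : (PySem.List.pyRange N 0 (-1)).foldl
      (fun res cow =>
        let idx : Int := if cow > 1 then PySem.List.pyGetD order (cow - 2) 0 else 0
        PySem.List.insert res idx cow) []
      = aSim order N (n+1) := by
    have h := aFold order N (n+1)
    rw [show N - ((n+1 : Nat) : Int) = 0 by push_cast; ring] at h
    exact h
  have hB : (PySem.List.pyRange 1 (N + 1) 1).foldl
      (fun (st : PVTree × List Int) cow =>
        let i : Int := if cow > 1 then PySem.List.pyGetD order (cow - 2) 0 else 0
        let e : Int := insertIndex i (N - cow)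
        let p := tTake st.1 e
        (p.2, st.2.set p.1.toNat cow)) (tBuild N.toNat 0 N, List.replicate N.toNat 0)
      = tSim order N (n+1) (tBuild N.toNat 0 N) (List.replicate N.toNat 0) := by
    have h := tFold order N (n+1) (tBuild N.toNat 0 N) (List.replicate N.toNat 0)
    rw [show N + 1 - ((n+1 : Nat) : Int) = 1 by push_cast; ring] at h
    exact h
  simp only [hA, hB]
  -- the built tree stands for the full slot range 0..N-1
  obtain ⟨hwf, hlist⟩ := tBuild_spec N.toNat 0 N (by omega) (by omega)
  have hfreelen : (PySem.List.pyRange 0 N 1).length = n+1 := by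
    rw [PySem.List.length_pyRange_one]; omega
  have hbridge := tSim_eq_oSim order N (n+1) (tBuild N.toNat 0 N)
    (List.replicate N.toNat 0) hwf (by rw [hlist, hfreelen])
  rw [hbridge, hlist]
  -- the core invariant, instantiated at the initial state
  obtain ⟨C1, C2, C3⟩ := oSim_core order N (n+1) (PySem.List.pyRange 0 N 1)
    (List.replicate N.toNat 0) hfreelen (PySem.List.nodup_pyRange_one 0 N)
    (fun x hx => by
      have := (PySem.List.mem_pyRange_one).mp hx; omega)
    (fun x hx => by
      have := (PySem.List.mem_pyRange_one).mp hx
      rw [List.length_replicate]; omega)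
  have hBlen : (oSim order N (n+1) (PySem.List.pyRange 0 N 1) (List.replicate N.toNat 0)).2.length
      = n+1 := by rw [C3, List.length_replicate]; omega
  congr 1
  apply List.ext_getElem
  · rw [aSim_length, hBlen]
  · intro i hi1 hi2
    have hil : i < n+1 := by rw [hBlen] at hi2; exact hi2
    have hC := C1 i (by omega)
    have hfj : (PySem.List.pyRange 0 N 1).getD i 0 = ((i : Nat) : Int) := by
      rw [List.getD_eq_getElem _ 0 (by omega), PySem.List.getElem_pyRange_one]
      omega
    rw [hfj, Int.toNat_natCast] at hC
    rw [List.getD_eq_getElem _ 0 hi2, List.getD_eq_getElem _ 0 (by rw [aSim_length]; omega)] at hC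
    exact hC.symm
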